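-- pv_equiv track=rewrite | github.com/kuha1088/GB_IntroPython_GU4025Sudakov | HomeWork/Seminar7/Task2/Task2.py | index_maker
-- ===== SOURCE A (Python) =====
-- def index_maker(parameters: tuple) -> tuple[tuple]:
--
--     (strings_number, columns_number) = parameters
--
--     indexes_list = []
--
--     for i in range(1, strings_number + 1):
--         for j in range(1, columns_number + 1):
--             index = (i, j)
--             indexes_list.append(index)
--
--     result = indexes_list
--     return result
-- ===== SOURCE B (Python) =====
-- def index_maker(parameters: tuple) -> tuple[tuple]:
--     (strings_number, columns_number) = parameters
--     if strings_number <= 0 or columns_number <= 0: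
--         return []
--     return [(k // columns_number + 1, k % columns_number + 1)
--             for k in range(strings_number * columns_number)]
-- ===== Notes on version B (the rewrite author's own statement) =====
-- stated objective: alternative
-- what changed: Replaces the two nested loops by a single flat loop over range(rows*cols), recovering each (row,col) pair from the flat index with divmod arithmetic (k//cols+1, k%cols+1).
import Mathlib
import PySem

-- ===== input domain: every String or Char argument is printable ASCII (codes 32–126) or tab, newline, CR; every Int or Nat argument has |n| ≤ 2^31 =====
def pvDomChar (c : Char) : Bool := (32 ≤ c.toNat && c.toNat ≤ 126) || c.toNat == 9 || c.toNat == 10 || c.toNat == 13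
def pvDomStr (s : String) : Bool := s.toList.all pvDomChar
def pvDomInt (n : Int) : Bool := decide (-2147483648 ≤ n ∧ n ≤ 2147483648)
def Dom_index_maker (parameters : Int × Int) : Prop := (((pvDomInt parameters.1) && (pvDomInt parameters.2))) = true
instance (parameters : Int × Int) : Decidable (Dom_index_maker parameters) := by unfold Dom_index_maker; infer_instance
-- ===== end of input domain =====

-- B flattens A's two nested loops into one flat loop over rows*cols with divmod index arithmetic (alternative decomposition, same cost).

-- ===== PORT A =====
-- nested for-loops appending (i, j); Python's O(1) list.append is represented by the
-- standard cons-accumulator with one final reverse (same loops, same order of appends)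
def index_maker (parameters : Int × Int) : List (Int × Int) :=
  ((PySem.List.pyRange 1 (parameters.1 + 1) 1).foldl
    (fun acc i =>
      (PySem.List.pyRange 1 (parameters.2 + 1) 1).foldl
        (fun acc2 j => (i, j) :: acc2) acc)
    []).reverse

-- ===== PORT B =====
-- early return [] for non-positive dimensions, else one comprehension over range(rows*cols)
def index_maker_alt (parameters : Int × Int) : List (Int × Int) :=
  if parameters.1 ≤ 0 ∨ parameters.2 ≤ 0 then []
  else
    (PySem.List.pyRange 0 (parameters.1 * parameters.2) 1).map
      (fun k => (PySem.Int.floordiv k parameters.2 + 1, PySem.Int.mod k parameters.2 + 1))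

-- ===== PRECONDITION & SPEC =====
def Spec_index_maker (parameters : Int × Int) (out : List (Int × Int)) : Prop := out = index_maker_alt parameters
instance (parameters : Int × Int) (out : List (Int × Int)) : Decidable (Spec_index_maker parameters out) := by unfold Spec_index_maker; infer_instance

-- ===== CLAIM (what is proved, stated in full; the proofs are below) =====
def Claim_equal_index_maker : Prop := ∀ (parameters : Int × Int), Dom_index_maker parameters → Spec_index_maker parameters (index_maker parameters)

-- ===== LEMMAS AND PROOFS =====

-- cons-accumulator loop shape: folding cons builds the reversed map
theorem foldl_cons_rev {α β : Type} (f : α → β) (l : List α) (acc : List β) :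
    l.foldl (fun a x => f x :: a) acc = (l.map f).reverse ++ acc := by
  induction l generalizing acc with
  | nil => simp
  | cons x xs ih => simp [ih]

-- outer loop shape: folding reversed rows builds the reversed flatMap
theorem foldl_revcat {α β : Type} (g : α → List β) (l : List α) (acc : List β) :
    l.foldl (fun a i => (g i).reverse ++ a) acc = (l.flatMap g).reverse ++ acc := by
  induction l generalizing acc with
  | nil => simp
  | cons x xs ih => simp [ih, List.flatMap_cons, List.reverse_append]

-- A's nested append-folds are a flatMap of row maps.
theorem index_maker_eq_flatMap (s c : Int) :
    index_maker (s, c) =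
      (PySem.List.pyRange 1 (s + 1) 1).flatMap
        (fun i => (PySem.List.pyRange 1 (c + 1) 1).map (fun j => (i, j))) := by
  unfold index_maker
  have h : ∀ (acc : List (Int × Int)) (i : Int),
      (PySem.List.pyRange 1 (c + 1) 1).foldl (fun acc2 j => (i, j) :: acc2) acc
        = ((PySem.List.pyRange 1 (c + 1) 1).map (fun j => (i, j))).reverse ++ acc :=
    fun acc i => foldl_cons_rev _ _ _
  simp only [h]
  rw [foldl_revcat]
  simp

-- Nat-side core: row-by-row enumeration equals the flat divmod enumeration.
theorem grid_core (S C : Nat) :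
    (List.range S).flatMap
        (fun (i : Nat) => (List.range C).map (fun (j : Nat) => ((1 + (i : Int), 1 + (j : Int)) : Int × Int)))
      = (List.range (S * C)).map
          (fun (k : Nat) => ((((k / C : Nat) : Int) + 1, ((k % C : Nat) : Int) + 1) : Int × Int)) := by
  induction S with
  | zero => simp
  | succ S ih =>
    rcases Nat.eq_zero_or_pos C with hC | hC
    · subst hC; simp
    · have hadd : (S + 1) * C = S * C + C := by ring
      rw [List.range_succ, List.flatMap_append, ih, List.flatMap_singleton,
          hadd, List.range_add, List.map_append, List.map_map]
      congr 1
      refine List.map_congr_left ?_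
      intro j hj
      have hjC : j < C := List.mem_range.mp hj
      have h1 : (S * C + j) / C = S := by
        rw [Nat.add_comm, Nat.add_mul_div_right _ _ hC, Nat.div_eq_of_lt hjC, Nat.zero_add]
      have h2 : (S * C + j) % C = j := by
        rw [Nat.add_comm, Nat.add_mul_mod_self_right, Nat.mod_eq_of_lt hjC]
      simp only [Function.comp_apply]
      rw [h1, h2]
      simp [add_comm]

-- ===== VERDICT (by name: the statement is the Claim_ definition above) =====
theorem index_maker_spec : Claim_equal_index_maker := by
  intro p _
  obtain ⟨s, c⟩ := p
  show index_maker (s, c) = index_maker_alt (s, c)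
  rw [index_maker_eq_flatMap]
  unfold index_maker_alt
  by_cases h : s ≤ 0 ∨ c ≤ 0
  · rw [if_pos h]
    rcases h with hs | hc
    · rw [PySem.List.pyRange_one_eq_nil (by omega : s + 1 ≤ 1)]; rfl
    · have hnil : ∀ i : Int, (PySem.List.pyRange 1 (c + 1) 1).map (fun j => ((i, j) : Int × Int)) = [] := by
        intro i; rw [PySem.List.pyRange_one_eq_nil (by omega : c + 1 ≤ 1)]; rfl
      simp [hnil]
  · rw [if_neg h]
    simp only [not_or, not_le] at h
    obtain ⟨hs, hc⟩ := h
    obtain ⟨S, rfl⟩ := Int.eq_ofNat_of_zero_le hs.le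
    obtain ⟨C, rfl⟩ := Int.eq_ofNat_of_zero_le hc.le
    rw [PySem.List.pyRange_one, PySem.List.pyRange_one, PySem.List.pyRange_one]
    have hS : (((S : Int) + 1) - 1).toNat = S := by omega
    have hC : (((C : Int) + 1) - 1).toNat = C := by omega
    have hSC : ((S : Int) * (C : Int) - 0).toNat = S * C := by
      rw [Int.sub_zero, ← Int.natCast_mul, Int.toNat_natCast]
    rw [hS, hC, hSC, List.flatMap_map]
    simp only [List.map_map, Function.comp_def, zero_add,
      PySem.Int.floordiv_natCast, PySem.Int.mod_natCast]
    exact grid_core S C
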